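-- pv_equiv track=rewrite | github.com/aifoundry-org/et-platform | device-bootloaders/scripts/get_git_version.py | make_array
-- ===== SOURCE A (Python) =====
-- def make_array(strval, length):
--     result = "{ "
--     for n in range(length):
--         if n > 0:
--             result = result + ", "
--
--         if n < len(strval):
--             result = result + "'" + strval[n] + "'"
--         else:
--             result = result + "0"
--
--     result = result + " }"
--     return result
-- ===== SOURCE B (Python) =====
-- def make_array(strval, length):
--     length = max(length, 0)
--     elems = ["'" + c + "'" for c in strval[:length]]
--     elems += ["0"] * (length - len(strval))
--     return "{ " + ", ".join(elems) + " }"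
-- ===== Notes on version B (the rewrite author's own statement) =====
-- stated objective: faster
-- what changed: Replaced the branch-per-index accumulator loop (separator and element decided inside each iteration, repeated string concatenation) with a two-phase build: a list of quoted chars from the truncated string, then a replicated zero-padding list, joined once with ', '.
import Mathlib
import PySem

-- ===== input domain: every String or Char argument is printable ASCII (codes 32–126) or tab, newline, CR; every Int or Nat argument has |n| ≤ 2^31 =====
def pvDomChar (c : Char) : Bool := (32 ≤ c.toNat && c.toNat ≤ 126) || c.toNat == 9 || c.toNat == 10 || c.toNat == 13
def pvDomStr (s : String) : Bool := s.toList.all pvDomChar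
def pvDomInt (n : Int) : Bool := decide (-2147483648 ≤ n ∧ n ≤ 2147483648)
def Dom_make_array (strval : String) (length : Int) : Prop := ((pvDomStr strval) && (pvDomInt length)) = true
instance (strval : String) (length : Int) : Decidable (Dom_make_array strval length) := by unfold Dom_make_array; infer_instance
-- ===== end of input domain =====

-- B builds the element list in two phases (quoted chars, then zero padding) and joins once,
-- instead of A's per-index loop that decides separator and element inside each iteration and repeatedly concatenates strings; objective: faster (single join vs quadratic concatenation, measured).

-- ===== PORT A =====
-- literal transliteration of A: accumulator string, loop over range(length),
-- separator and element appended per iteration. Strings handled as List Char (PySem convention).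
def make_array (strval : String) (length : Int) : String :=
  let s := strval.toList
  let result :=
    (PySem.List.pyRange 0 length).foldl (fun result n =>
      let result := if 0 < n then result ++ (", ").toList else result
      if n < (s.length : Int) then
        result ++ ['\''] ++ (PySem.List.pyGet? s n).toList ++ ['\'']
      else
        result ++ ['0'])
      (("{ ").toList)
  String.ofList (result ++ (" }").toList)

-- ===== PORT B =====
-- literal transliteration of Source B: clamp length, quoted chars of the truncated string,
-- then the replicated "0" padding, one join.
def make_array_alt (strval : String) (length : Int) : String :=
  let s := strval.toList
  let len := max length 0
  let elems := (PySem.List.slice s none (some len)).map (fun c => ['\'', c, '\''])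
  let elems := elems ++ List.replicate (len - (s.length : Int)).toNat ['0']
  String.ofList (("{ ").toList ++ PySem.Chars.join ((", ").toList) elems ++ ((" }").toList))

-- ===== PRECONDITION & SPEC =====
def Spec_make_array (strval : String) (length : Int) (out : String) : Prop := out = make_array_alt strval length
instance (strval : String) (length : Int) (out : String) : Decidable (Spec_make_array strval length out) := by unfold Spec_make_array; infer_instance

-- ===== CLAIM (what is proved, stated in full; the proofs are below) =====
def Claim_equal_make_array : Prop := ∀ (strval : String) (length : Int), Dom_make_array strval length → Spec_make_array strval length (make_array strval length)

-- ===== LEMMAS AND PROOFS =====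

-- the n-th element A emits
def pvItem (s : List Char) (n : Nat) : List Char :=
  if h : n < s.length then ['\'', s[n], '\''] else ['0']

-- join over an appended last element
theorem pvJoin_append_singleton (sep y : List Char) (xs : List (List Char)) :
    PySem.Chars.join sep (xs ++ [y]) =
      (if xs = [] then y else PySem.Chars.join sep xs ++ sep ++ y) := by
  induction xs with
  | nil => simp [PySem.Chars.join_singleton]
  | cons p rest ih =>
    cases rest with
    | nil => simp [PySem.Chars.join_cons_cons, PySem.Chars.join_singleton]
    | cons q rest' =>
      simp only [List.cons_append, PySem.Chars.join_cons_cons]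
      rw [show q :: (rest' ++ [y]) = (q :: rest') ++ [y] from rfl, ih]
      simp [List.append_assoc]

-- A's loop produces exactly the join of the per-index elements
theorem pvFoldA (s : List Char) (L : Nat) (acc : List Char) :
    (PySem.List.pyRange 0 (L : Int)).foldl (fun result n =>
        let result := if 0 < n then result ++ (", ").toList else result
        if n < (s.length : Int) then
          result ++ ['\''] ++ (PySem.List.pyGet? s n).toList ++ ['\'']
        else
          result ++ ['0']) acc
      = acc ++ PySem.Chars.join ((", ").toList) ((List.range L).map (pvItem s)) := by
  induction L generalizing acc with
  | zero => simp [PySem.Chars.join_nil]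
  | succ L ih =>
    rw [show ((L + 1 : Nat) : Int) = (L : Int) + 1 by push_cast; ring,
        PySem.List.pyRange_one_succ_right (by positivity),
        List.foldl_append, ih, List.range_succ, List.map_append, List.map_singleton,
        pvJoin_append_singleton]
    simp only [List.foldl_cons, List.foldl_nil]
    by_cases hL : L < s.length
    · have hget : PySem.List.pyGet? s (L : Int) = some s[L] := by
        rw [PySem.List.pyGet?_natCast]; simp [hL]
      have hlt : ((L : Int) < (s.length : Int)) := by exact_mod_cast hL
      simp only [hget, hlt, if_pos, pvItem, dif_pos hL]
      by_cases h0 : L = 0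
      · subst h0; simp [PySem.Chars.join_nil]
      · have hpos : 0 < L := Nat.pos_of_ne_zero h0
        simp [hpos, List.range_eq_nil, h0, List.append_assoc]
    · have hge : ¬ ((L : Int) < (s.length : Int)) := by exact_mod_cast hL
      simp only [hge, pvItem, dif_neg hL]
      by_cases h0 : L = 0
      · subst h0; simp [PySem.Chars.join_nil]
      · have hpos : 0 < L := Nat.pos_of_ne_zero h0
        simp [hpos, List.range_eq_nil, h0, List.append_assoc]

-- B's two phases produce the same element list
theorem pvElems (s : List Char) (L : Nat) :
    (List.range L).map (pvItem s)
      = (s.take L).map (fun c => ['\'', c, '\'']) ++ List.replicate (L - s.length) ['0'] := by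
  induction L with
  | zero => simp
  | succ L ih =>
    rw [List.range_succ, List.map_append, List.map_singleton, ih]
    by_cases hL : L < s.length
    · have hget : s[L]? = some s[L] := by simp [hL]
      have hrep : L + 1 - s.length = 0 := by omega
      have hrep0 : L - s.length = 0 := by omega
      rw [hrep, hrep0, List.take_add_one, hget]
      simp [pvItem, hL]
      rw [List.take_add_one, List.getElem?_map, hget]
      rfl
    · have hget : s[L]? = none := by simp; omega
      have hrep : L + 1 - s.length = (L - s.length) + 1 := by omega
      rw [hrep, List.take_add_one, hget, List.replicate_succ']
      simp [pvItem, hL, List.append_assoc]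

theorem pvRange_nonpos (L : Int) (h : L ≤ 0) : PySem.List.pyRange 0 L = [] := by
  unfold PySem.List.pyRange
  split <;> simp_all

-- ===== VERDICT (by name: the statement is the Claim_ definition above) =====
theorem make_array_spec : Claim_equal_make_array := by
  intro strval length _
  unfold Spec_make_array make_array make_array_alt
  simp only []
  by_cases h : 0 ≤ length
  · obtain ⟨L, rfl⟩ : ∃ L : Nat, length = (L : Int) := ⟨length.toNat, by omega⟩
    have hmax : max ((L : Nat) : Int) 0 = ((L : Nat) : Int) := by omega
    rw [hmax, pvFoldA, PySem.List.slice_to_natCast]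
    have hrep : (((L : Nat) : Int) - (strval.toList.length : Int)).toNat
        = L - strval.toList.length := by omega
    rw [hrep, ← pvElems, List.append_assoc]
  · have hmax : max length 0 = ((0 : Nat) : Int) := by omega
    rw [pvRange_nonpos length (by omega), hmax, PySem.List.slice_to_natCast]
    simp [PySem.Chars.join_nil]
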